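-- pv_equiv track=rewrite | github.com/anubhab-code/Competitive-Programming | CodeWars/8 Kyu/Find the first non-consecutive number.py | first_non_consecutive
-- ===== SOURCE A (Python) =====
-- def first_non_consecutive(arr):
--     numbers = arr[:]
--     numbers.sort()
--     first = numbers[0]
--     last = numbers[len(numbers)-1]+1
--     for i in range(first,last):
--         if i not in numbers:
--             return i+1
--     return None
-- ===== SOURCE B (Python) =====
-- def first_non_consecutive(arr):
--     s = sorted(arr)
--     if not s:
--         return None
--     prev = s[0]
--     for x in s[1:]:
--         if x > prev + 1:
--             return prev + 2
--         prev = x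
--     return None
-- ===== Notes on version B (the rewrite author's own statement) =====
-- stated objective: alternative
-- what changed: A scans every integer from min to max and tests membership in the list; B sorts once and makes a single adjacent-pair pass over the sorted list, returning prev+2 at the first gap.
import Mathlib
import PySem

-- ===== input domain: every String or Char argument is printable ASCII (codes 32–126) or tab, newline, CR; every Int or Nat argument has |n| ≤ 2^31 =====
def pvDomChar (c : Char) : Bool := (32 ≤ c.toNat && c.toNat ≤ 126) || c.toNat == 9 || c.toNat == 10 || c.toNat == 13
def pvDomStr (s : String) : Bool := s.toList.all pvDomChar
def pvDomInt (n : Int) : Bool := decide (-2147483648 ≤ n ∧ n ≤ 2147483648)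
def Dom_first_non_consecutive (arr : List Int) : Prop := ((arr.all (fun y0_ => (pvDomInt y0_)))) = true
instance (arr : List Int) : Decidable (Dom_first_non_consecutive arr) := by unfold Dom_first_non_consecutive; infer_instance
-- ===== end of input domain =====

-- B replaces A's min-to-max membership scan by one adjacent-pair pass over the sorted list (objective: alternative).

-- ===== PORT A =====
-- for i in range(first, last): if i not in numbers: return i+1
-- (ported as a fuel loop counting i up from first, lazy like Python's range iteration)
def fncLoopA (numbers : List Int) : Nat → Int → Option Int
  | 0, _ => none
  | Nat.succ n, i => if i ∈ numbers then fncLoopA numbers n (i + 1) else some (i + 1)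

def first_non_consecutive (arr : List Int) : Option Int :=
  let numbers := PySem.List.sorted arr (fun x => x) false
  match PySem.List.pyGet? numbers 0 with
  | none => none  -- Python raises IndexError here (empty list); excluded by Pre_
  | some first =>
    let last := (PySem.List.pyGet? numbers ((numbers.length : Int) - 1)).getD 0 + 1
    fncLoopA numbers (last - first).toNat first

-- ===== PORT B =====
-- for x in s[1:]: if x > prev + 1: return prev + 2; prev = x
def fncLoopB (prev : Int) : List Int → Option Int
  | [] => none
  | x :: rest => if x > prev + 1 then some (prev + 2) else fncLoopB x rest

def first_non_consecutive_alt (arr : List Int) : Option Int :=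
  match PySem.List.sorted arr (fun x => x) false with
  | [] => none
  | p :: rest => fncLoopB p rest

-- ===== PRECONDITION & SPEC =====
-- Pre_ excludes only the empty list, on which A raises IndexError (numbers[0]).
def Pre_first_non_consecutive (arr : List Int) : Prop := arr ≠ []
instance (arr : List Int) : Decidable (Pre_first_non_consecutive arr) := by unfold Pre_first_non_consecutive; infer_instance
def pvWitness_first_non_consecutive : List Int := [3, 1, 2, 5]

def Spec_first_non_consecutive (arr : List Int) (out : Option Int) : Prop := out = first_non_consecutive_alt arr
instance (arr : List Int) (out : Option Int) : Decidable (Spec_first_non_consecutive arr out) := by unfold Spec_first_non_consecutive; infer_instance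

-- ===== CLAIM (what is proved, stated in full; the proofs are below) =====
def Claim_equal_first_non_consecutive : Prop := ∀ (arr : List Int), Dom_first_non_consecutive arr → Pre_first_non_consecutive arr → Spec_first_non_consecutive arr (first_non_consecutive arr)

-- ===== LEMMAS AND PROOFS =====

-- proof-side list view of A's loop: the same scan over the materialized range
def fncLoopAL (numbers : List Int) : List Int → Option Int
  | [] => none
  | i :: rest => if i ∈ numbers then fncLoopAL numbers rest else some (i + 1)

-- the fuel loop is the list scan over pyRange
theorem fncLoopA_eq_list (numbers : List Int) : ∀ (n : Nat) (i : Int),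
    fncLoopA numbers n i = fncLoopAL numbers (PySem.List.pyRange i (i + n) 1) := by
  intro n
  induction n with
  | zero =>
    intro i
    rw [PySem.List.pyRange_one_eq_nil (by omega)]
    rfl
  | succ n ih =>
    intro i
    rw [show ((n + 1 : Nat) : Int) = (n : Int) + 1 from by push_cast; ring,
      PySem.List.pyRange_one_cons (by omega : i < i + ((n : Int) + 1))]
    simp only [fncLoopA, fncLoopAL]
    by_cases hm : i ∈ numbers
    · rw [if_pos hm, if_pos hm, ih (i + 1),
        show i + ((n : Int) + 1) = (i + 1) + (n : Int) by ring]
    · rw [if_neg hm, if_neg hm]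

-- A's loop only looks at membership, so membership-equivalent lists give the same run.
theorem fncLoopAL_congr (s s' : List Int) (r : List Int)
    (h : ∀ i ∈ r, (i ∈ s ↔ i ∈ s')) : fncLoopAL s r = fncLoopAL s' r := by
  induction r with
  | nil => rfl
  | cons i rest ih =>
    simp only [fncLoopAL]
    have hi := h i (List.mem_cons_self)
    by_cases hm : i ∈ s
    · rw [if_pos hm, if_pos (hi.mp hm)]
      exact ih (fun j hj => h j (List.mem_cons_of_mem _ hj))
    · rw [if_neg hm, if_neg (fun h' => hm (hi.mpr h'))]

-- Main invariant: on a sorted (nondecreasing) nonempty list x :: t, A's scan of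
-- range(x, last+1) against membership in x :: t equals B's adjacent-gap pass.
theorem loops_agree (t : List Int) : ∀ (x : Int),
    (x :: t).Pairwise (fun a b => a ≤ b) →
    fncLoopAL (x :: t) (PySem.List.pyRange x ((x :: t).getLast (by simp) + 1) 1) = fncLoopB x t := by
  induction t with
  | nil =>
    intro x _
    have : (PySem.List.pyRange x (x + 1) 1) = [x] := PySem.List.pyRange_one_singleton x
    simp [this, fncLoopAL, fncLoopB]
  | cons y t' ih =>
    intro x hs
    have hxy : x ≤ y := (List.pairwise_cons.mp hs).1 y List.mem_cons_self
    have hs' : (y :: t').Pairwise (fun a b => a ≤ b) := (List.pairwise_cons.mp hs).2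
    have hxall : ∀ z ∈ y :: t', x ≤ z := (List.pairwise_cons.mp hs).1
    have hlast_mem : (y :: t').getLast (by simp) ∈ y :: t' := List.getLast_mem _
    have hylast : y ≤ (y :: t').getLast (by simp) := by
      rcases List.pairwise_cons.mp hs' with ⟨hy, _⟩
      rcases (List.mem_cons.mp hlast_mem) with h | h
      · omega
      · exact hy _ h
    have hglast : ((x :: y :: t').getLast (by simp)) = ((y :: t').getLast (by simp)) := by
      simp [List.getLast_cons]
    set l := (y :: t').getLast (by simp) with hl
    by_cases hgap : y > x + 1
    · -- gap: range = x :: (x+1) :: …, x present, x+1 absent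
      have h1 : PySem.List.pyRange x (l + 1) 1 = x :: PySem.List.pyRange (x + 1) (l + 1) 1 :=
        PySem.List.pyRange_one_cons (by omega)
      have h2 : PySem.List.pyRange (x + 1) (l + 1) 1 = (x + 1) :: PySem.List.pyRange (x + 1 + 1) (l + 1) 1 :=
        PySem.List.pyRange_one_cons (show x + 1 < l + 1 by omega)
      have hnot : (x + 1) ∉ x :: y :: t' := by
        intro hmem
        rcases List.mem_cons.mp hmem with h | h
        · omega
        · have := hxall _ h
          rcases List.mem_cons.mp h with h' | h'
          · omega
          · have := (List.pairwise_cons.mp hs').1 _ h'; omega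
      have e1 : fncLoopAL (x :: y :: t') (x :: PySem.List.pyRange (x + 1) (l + 1) 1)
              = fncLoopAL (x :: y :: t') (PySem.List.pyRange (x + 1) (l + 1) 1) := by
        simp [fncLoopAL]
      have e2 : fncLoopAL (x :: y :: t') ((x + 1) :: PySem.List.pyRange (x + 1 + 1) (l + 1) 1)
              = some (x + 1 + 1) := by
        simp only [fncLoopAL]
        rw [if_neg hnot]
      have e3 : fncLoopB x (y :: t') = some (x + 2) := by
        simp only [fncLoopB]
        rw [if_pos hgap]
      rw [hglast, h1, e1, h2, e2, e3]
      congr 1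
      omega
    · -- no gap: y = x or y = x+1; peel x and transfer membership to y :: t'
      rw [gt_iff_lt, not_lt] at hgap
      have key : fncLoopAL (x :: y :: t') (PySem.List.pyRange x (l + 1) 1)
               = fncLoopAL (y :: t') (PySem.List.pyRange y (l + 1) 1) := by
        rcases (by omega : y = x ∨ y = x + 1) with heq | heq
        · subst heq
          exact fncLoopAL_congr _ _ _ (by intro i _; simp [List.mem_cons])
        · have h1 : PySem.List.pyRange x (l + 1) 1 = x :: PySem.List.pyRange (x + 1) (l + 1) 1 :=
            PySem.List.pyRange_one_cons (by omega)
          rw [h1]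
          simp only [fncLoopAL, if_pos (show x ∈ x :: y :: t' from List.mem_cons_self)]
          rw [show x + 1 = y by omega]
          exact fncLoopAL_congr _ _ _ (by
            intro i hi
            have := (PySem.List.mem_pyRange_one).mp hi
            simp only [List.mem_cons]
            constructor
            · rintro (h | h)
              · omega
              · exact h
            · intro h; right; exact h)
      rw [hglast, key, hl, ih y hs']
      simp [fncLoopB, show ¬ (y > x + 1) from by omega]

-- head/last of the sorted list via pyGet?
theorem pyGet?_head (p : Int) (t : List Int) : PySem.List.pyGet? (p :: t) 0 = some p :=
  PySem.List.pyGet?_zero_cons p t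

-- ===== VERDICT (by name: the statement is the Claim_ definition above) =====
theorem first_non_consecutive_spec : Claim_equal_first_non_consecutive := by
  intro arr _ hpre
  unfold Spec_first_non_consecutive first_non_consecutive first_non_consecutive_alt
  have hperm := PySem.List.sorted_perm arr (fun x => x) false
  have hne : PySem.List.sorted arr (fun x => x) false ≠ [] := by
    intro h; rw [h] at hperm; exact hpre hperm.symm.eq_nil
  obtain ⟨p, t, hpt⟩ := List.exists_cons_of_ne_nil hne
  have hsorted : (PySem.List.sorted arr (fun x => x) false).Pairwise (fun a b => a ≤ b) := by
    have := PySem.List.sorted_pairwise arr (fun x => x)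
    simpa using this
  rw [hpt] at hsorted ⊢
  simp only [pyGet?_head]
  have hlastGet : PySem.List.pyGet? (p :: t) (((p :: t).length : Int) - 1) = some ((p :: t).getLast (by simp)) := by
    have h1 : (((p :: t).length : Int) - 1) = ((t.length : Nat) : Int) := by
      push_cast [List.length_cons]; ring
    rw [h1, PySem.List.pyGet?_natCast]
    rw [List.getElem?_eq_getElem (by simp)]
    simp [List.getLast_eq_getElem]
    rfl
  rw [hlastGet]
  simp only [Option.getD_some]
  have hpl : p ≤ (p :: t).getLast (by simp) := by
    rcases List.mem_cons.mp (List.getLast_mem (l := p :: t) (by simp)) with h | h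
    · omega
    · exact (List.pairwise_cons.mp hsorted).1 _ h
  rw [fncLoopA_eq_list,
    show p + ((((p :: t).getLast (by simp) + 1 - p).toNat : Nat) : Int)
       = (p :: t).getLast (by simp) + 1 by omega]
  exact loops_agree t p hsorted
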